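-- pv_equiv track=rewrite | github.com/ukaran11/gigmoney-guru | backend/app/agents/cashflow_planner.py | _build_obligation_lookup
-- ===== SOURCE A (Python) =====
-- from typing import Dict, Any, List
--
-- def _build_obligation_lookup(obligations: List[Dict]) -> Dict[int, List[Dict]]:
--     """Build lookup of obligations by due day."""
--     lookup = {}
--     for obligation in obligations:
--         if not obligation.get("is_active", True):
--             continue
--         due_day = obligation.get("due_day", 1)
--         if due_day not in lookup:
--             lookup[due_day] = []
--         lookup[due_day].append(obligation)
--     return lookup
-- ===== SOURCE B (Python) =====
-- from typing import Dict, Any, List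
--
-- def _build_obligation_lookup(obligations: List[Dict]) -> Dict[int, List[Dict]]:
--     """Build lookup of obligations by due day (filter / dedup-keys / per-day comprehension)."""
--     active = [o for o in obligations if o.get("is_active", True)]
--     days = list(dict.fromkeys(o.get("due_day", 1) for o in active))
--     return {day: [o for o in active if o.get("due_day", 1) == day] for day in days}
-- ===== Notes on version B (the rewrite author's own statement) =====
-- stated objective: alternative
-- what changed: B replaces A's single mutable-dict bucketing pass by a three-stage pipeline: filter the active obligations once, take the ordered-deduplicated list of due days, and build the result with one per-day filtering comprehension.
import Mathlib
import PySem

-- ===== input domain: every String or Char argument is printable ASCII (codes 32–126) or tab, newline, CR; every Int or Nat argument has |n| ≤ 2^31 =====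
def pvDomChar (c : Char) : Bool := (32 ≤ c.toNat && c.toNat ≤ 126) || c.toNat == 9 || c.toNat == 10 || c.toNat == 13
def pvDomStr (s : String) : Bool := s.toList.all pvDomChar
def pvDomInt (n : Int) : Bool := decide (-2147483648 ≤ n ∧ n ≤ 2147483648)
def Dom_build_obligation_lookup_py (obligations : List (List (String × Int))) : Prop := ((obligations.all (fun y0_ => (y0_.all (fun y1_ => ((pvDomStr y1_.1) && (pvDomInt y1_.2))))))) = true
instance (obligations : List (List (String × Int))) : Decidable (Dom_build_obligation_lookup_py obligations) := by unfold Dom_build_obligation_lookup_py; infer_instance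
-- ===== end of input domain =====

-- B groups the obligations by a filter-active / ordered-dedup-of-due-days / per-day filtering pipeline instead of A's single bucketing pass (alternative decomposition, identical result).

-- ===== PORT A =====
def build_obligation_lookup_py (obligations : List (List (String × Int))) : List (Int × List (List (String × Int))) :=
  (obligations.foldl
    (fun lookup obligation =>
      if !(match (PySem.Dict.mk obligation : PySem.Dict String Int).get? "is_active" with
           | none => true
           | some v => v != 0) then
        lookup
      else
        let due_day := (PySem.Dict.mk obligation).getD "due_day" 1
        let lookup1 := if !lookup.contains due_day then lookup.insert due_day [] else lookup
        lookup1.modify due_day [] (fun l => l ++ [obligation]))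
    (PySem.Dict.empty : PySem.Dict Int (List (List (String × Int))))).items

-- ===== PORT B =====
-- B-side helpers: truthiness of obligation.get("is_active", True), and obligation.get("due_day", 1)
def pvIsActive (obligation : List (String × Int)) : Bool :=
  match (PySem.Dict.mk obligation).get? "is_active" with
  | none => true
  | some v => v != 0

def pvDueDay (obligation : List (String × Int)) : Int :=
  (PySem.Dict.mk obligation).getD "due_day" 1

def build_obligation_lookup_py_alt (obligations : List (List (String × Int))) : List (Int × List (List (String × Int))) :=
  let active := obligations.filter pvIsActive
  let days := PySem.List.dedup (active.map pvDueDay)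
  days.map (fun day => (day, active.filter (fun o => pvDueDay o == day)))

-- ===== PRECONDITION & SPEC =====
def Spec_build_obligation_lookup_py (obligations : List (List (String × Int))) (out : List (Int × List (List (String × Int)))) : Prop := out = build_obligation_lookup_py_alt obligations
instance (obligations : List (List (String × Int))) (out : List (Int × List (List (String × Int)))) : Decidable (Spec_build_obligation_lookup_py obligations out) := by unfold Spec_build_obligation_lookup_py; infer_instance

-- ===== CLAIM (what is proved, stated in full; the proofs are below) =====
def Claim_equal_build_obligation_lookup_py : Prop := ∀ (obligations : List (List (String × Int))), Dom_build_obligation_lookup_py obligations → Spec_build_obligation_lookup_py obligations (build_obligation_lookup_py obligations)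

-- ===== LEMMAS AND PROOFS =====

-- A's loop body, named for the proofs (definitionally the lambda in the port)
def aStep (lookup : PySem.Dict Int (List (List (String × Int)))) (obligation : List (String × Int)) : PySem.Dict Int (List (List (String × Int))) :=
  if !(match (PySem.Dict.mk obligation : PySem.Dict String Int).get? "is_active" with
       | none => true
       | some v => v != 0) then
    lookup
  else
    let due_day := (PySem.Dict.mk obligation).getD "due_day" 1
    let lookup1 := if !lookup.contains due_day then lookup.insert due_day [] else lookup
    lookup1.modify due_day [] (fun l => l ++ [obligation])

theorem build_eq_foldl (obligations : List (List (String × Int))) :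
    build_obligation_lookup_py obligations = (obligations.foldl aStep (PySem.Dict.empty : PySem.Dict Int (List (List (String × Int))))).items := rfl

-- the canonical dict B describes: keys = deduped due days of pre, value = the matching sublist of pre
def canonD (pre : List (List (String × Int))) : PySem.Dict Int (List (List (String × Int))) :=
  PySem.Dict.mk ((PySem.List.dedup (pre.map pvDueDay)).map
    (fun d => (d, pre.filter (fun o => pvDueDay o == d))))

theorem keys_canonD (pre : List (List (String × Int))) :
    (canonD pre).keys = PySem.List.dedup (pre.map pvDueDay) := by
  simp [canonD, PySem.Dict.keys, Function.comp_def]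

theorem nodup_keys_canonD (pre : List (List (String × Int))) : (canonD pre).keys.Nodup := by
  rw [keys_canonD]
  exact PySem.Set.nodup_ofList _

theorem contains_canonD (pre : List (List (String × Int))) (d : Int) :
    (canonD pre).contains d = decide (d ∈ pre.map pvDueDay) := by
  rw [PySem.Dict.contains_eq_decide_mem_keys, keys_canonD]
  simp [PySem.List.dedup, PySem.Set.mem_ofList]

theorem getD_canonD (pre : List (List (String × Int))) (d : Int) :
    (canonD pre).getD d [] = pre.filter (fun o => pvDueDay o == d) := by
  by_cases h : d ∈ pre.map pvDueDay
  · refine PySem.Dict.getD_of_mem_items _ ?_ (nodup_keys_canonD pre) []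
    show (d, pre.filter (fun o => pvDueDay o == d)) ∈
      (PySem.List.dedup (pre.map pvDueDay)).map (fun d => (d, pre.filter (fun o => pvDueDay o == d)))
    exact List.mem_map_of_mem ((PySem.Set.mem_ofList _ _).mpr h)
  · rw [PySem.Dict.getD_of_not_contains _ [] (by rw [contains_canonD]; simpa using h)]
    symm
    rw [List.filter_eq_nil_iff]
    intro o ho hbe
    exact h ((beq_iff_eq.mp hbe) ▸ List.mem_map_of_mem ho)

theorem aStep_inactive (D : PySem.Dict Int (List (List (String × Int)))) (ob : List (String × Int))
    (h : pvIsActive ob = false) : aStep D ob = D := by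
  unfold aStep
  rw [show (match (PySem.Dict.mk ob).get? "is_active" with
            | none => true
            | some v => v != 0) = pvIsActive ob from rfl, h]
  simp

theorem aStep_active (D : PySem.Dict Int (List (List (String × Int)))) (ob : List (String × Int))
    (h : pvIsActive ob = true) :
    aStep D ob = D.insert (pvDueDay ob) (D.getD (pvDueDay ob) [] ++ [ob]) := by
  unfold aStep
  rw [show (match (PySem.Dict.mk ob).get? "is_active" with
            | none => true
            | some v => v != 0) = pvIsActive ob from rfl, h]
  rw [show (PySem.Dict.mk ob).getD "due_day" 1 = pvDueDay ob from rfl]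
  by_cases hc : D.contains (pvDueDay ob) = true
  · simp [hc, PySem.Dict.modify]
  · have hc' : D.contains (pvDueDay ob) = false := by simpa using hc
    simp only [hc', Bool.not_false, if_true, Bool.not_true, PySem.Dict.modify,
      PySem.Dict.getD_insert_self, PySem.Dict.insert_insert_self,
      PySem.Dict.getD_of_not_contains D [] hc']
    simp

theorem aStep_canonD (pre : List (List (String × Int))) (ob : List (String × Int))
    (h : pvIsActive ob = true) : aStep (canonD pre) ob = canonD (pre ++ [ob]) := by
  rw [aStep_active _ _ h, getD_canonD]
  apply PySem.Dict.ext
  rw [PySem.Dict.items_insert, contains_canonD]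
  have hded : PySem.List.dedup ((pre ++ [ob]).map pvDueDay)
      = PySem.Set.add (PySem.List.dedup (pre.map pvDueDay)) (pvDueDay ob) := by
    simp only [PySem.List.dedup, List.map_append, List.map_cons, List.map_nil]
    exact PySem.Set.ofList_append_singleton _ _
  have hobd : ∀ d : Int, d ≠ pvDueDay ob →
      List.filter (fun o => pvDueDay o == d) (pre ++ [ob]) = List.filter (fun o => pvDueDay o == d) pre := by
    intro d hd0
    rw [List.filter_append]
    have hnil : List.filter (fun o => pvDueDay o == d) [ob] = [] := by
      simp [Ne.symm hd0]
    rw [hnil, List.append_nil]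
  by_cases hmem : pvDueDay ob ∈ pre.map pvDueDay
  · rw [if_pos (decide_eq_true hmem)]
    have hded' : PySem.List.dedup ((pre ++ [ob]).map pvDueDay)
        = PySem.List.dedup (pre.map pvDueDay) := by
      rw [hded]
      exact PySem.Set.add_of_mem ((PySem.Set.mem_ofList _ _).mpr hmem)
    simp only [canonD]
    rw [hded', List.map_map]
    apply List.map_congr_left
    intro d hd
    by_cases hd0 : d = pvDueDay ob
    · subst hd0
      simp [List.filter_append]
    · have hne : (d == pvDueDay ob) = false := by simpa using hd0
      simp only [Function.comp_apply, hne, Bool.false_eq_true, if_false, hobd d hd0]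
  · rw [if_neg (by simpa using hmem)]
    have hded' : PySem.List.dedup ((pre ++ [ob]).map pvDueDay)
        = PySem.List.dedup (pre.map pvDueDay) ++ [pvDueDay ob] := by
      rw [hded]
      exact PySem.Set.add_of_not_mem (fun hm => hmem ((PySem.Set.mem_ofList _ _).mp hm))
    have hfnil : pre.filter (fun o => pvDueDay o == pvDueDay ob) = [] := by
      rw [List.filter_eq_nil_iff]
      intro o ho hbe
      exact hmem ((beq_iff_eq.mp hbe) ▸ List.mem_map_of_mem ho)
    simp only [canonD]
    rw [hded', List.map_append, List.map_cons, List.map_nil]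
    congr 1
    · apply List.map_congr_left
      intro d hd
      have hd0 : d ≠ pvDueDay ob := fun he => hmem ((PySem.Set.mem_ofList _ _).mp (he ▸ hd))
      rw [hobd d hd0]
    · simp [List.filter_append, hfnil]

theorem loop_canonD (obs pre : List (List (String × Int))) :
    obs.foldl aStep (canonD pre) = canonD (pre ++ obs.filter pvIsActive) := by
  induction obs generalizing pre with
  | nil => simp
  | cons ob obs ih =>
    by_cases h : pvIsActive ob = true
    · rw [List.foldl_cons, aStep_canonD pre ob h, ih]
      simp [h]
    · have h' : pvIsActive ob = false := by simpa using h
      rw [List.foldl_cons, aStep_inactive _ _ h', ih]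
      simp [h']

theorem canonD_nil : canonD [] = PySem.Dict.empty := rfl

-- ===== VERDICT (by name: the statement is the Claim_ definition above) =====
theorem build_obligation_lookup_py_spec : Claim_equal_build_obligation_lookup_py := by
  intro obligations _
  show build_obligation_lookup_py obligations = build_obligation_lookup_py_alt obligations
  rw [build_eq_foldl, ← canonD_nil, loop_canonD, List.nil_append]
  rfl
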